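-- pv_equiv track=rewrite | github.com/mxfold/mxfold2 | dnnfold/comp-bpseq.py | compare_bpseq
-- ===== SOURCE A (Python) =====
-- def compare_bpseq(ref, pred):
--     assert(len(ref) == len(pred))
--     tp = fp = fn = 0
--     for i, (j1, j2) in enumerate(zip(ref, pred)):
--         if j1 > 0 and i < j1: # pos
--             if j1 == j2:
--                 tp += 1
--             elif j2 > 0 and i < j2:
--                 fp += 1
--                 fn += 1
--             else:
--                 fn += 1
--         elif j2 > 0 and i < j2:
--             fp += 1
--     tn = len(ref) * (len(ref) - 1) // 2 - tp - fp - fn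
--     return (tp, tn, fp, fn)
-- ===== SOURCE B (Python) =====
-- def compare_bpseq(ref, pred):
--     assert(len(ref) == len(pred))
--     ref_pairs = {(i, r) for i, r in enumerate(ref) if r > 0 and i < r}
--     pred_pairs = {(i, p) for i, p in enumerate(pred) if p > 0 and i < p}
--     tp = len(ref_pairs & pred_pairs)
--     fp = len(pred_pairs - ref_pairs)
--     fn = len(ref_pairs - pred_pairs)
--     n = len(ref)
--     tn = n * (n - 1) // 2 - tp - fp - fn
--     return (tp, tn, fp, fn)
-- ===== Notes on version B (the rewrite author's own statement) =====
-- stated objective: idiomatic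
-- what changed: Replaces the branchy five-way accumulator loop by building the two sets of (smaller-index, partner) base pairs and computing tp/fp/fn as set intersection and differences.
import Mathlib
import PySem

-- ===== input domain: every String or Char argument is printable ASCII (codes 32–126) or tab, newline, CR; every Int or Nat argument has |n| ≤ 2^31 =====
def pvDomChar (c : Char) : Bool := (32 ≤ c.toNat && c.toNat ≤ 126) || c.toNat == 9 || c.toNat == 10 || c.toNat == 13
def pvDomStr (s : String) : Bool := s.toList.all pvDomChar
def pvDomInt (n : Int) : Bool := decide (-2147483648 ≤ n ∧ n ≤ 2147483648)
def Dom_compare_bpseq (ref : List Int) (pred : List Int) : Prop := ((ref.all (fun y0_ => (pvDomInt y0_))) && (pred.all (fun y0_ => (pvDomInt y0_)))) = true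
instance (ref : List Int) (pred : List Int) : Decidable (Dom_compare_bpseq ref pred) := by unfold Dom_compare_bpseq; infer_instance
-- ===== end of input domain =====

-- B replaces A's branchy accumulator loop by two base-pair sets and set intersection/differences (objective: idiomatic).
-- Both A and B assert len(ref) == len(pred); Pre_ excludes unequal lengths (AssertionError in both).

-- ===== PORT A =====
-- the for-loop over enumerate(zip(ref, pred)) with accumulators tp, fp, fn
def pvALoop (i : Int) (l : List (Int × Int)) (tp fp fn : Int) : Int × Int × Int :=
  match l with
  | [] => (tp, fp, fn)
  | (j1, j2) :: t =>
    if j1 > 0 ∧ i < j1 then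
      if j1 = j2 then pvALoop (i + 1) t (tp + 1) fp fn
      else if j2 > 0 ∧ i < j2 then pvALoop (i + 1) t tp (fp + 1) (fn + 1)
      else pvALoop (i + 1) t tp fp (fn + 1)
    else if j2 > 0 ∧ i < j2 then pvALoop (i + 1) t tp (fp + 1) fn
    else pvALoop (i + 1) t tp fp fn

def compare_bpseq (ref : List Int) (pred : List Int) : Int × Int × Int × Int :=
  let (tp, fp, fn) := pvALoop 0 (ref.zip pred) 0 0 0
  let n : Int := ref.length
  let tn := PySem.Int.floordiv (n * (n - 1)) 2 - tp - fp - fn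
  (tp, tn, fp, fn)

-- ===== PORT B =====
-- the set {(i, x) for i, x in enumerate(xs) if x > 0 and i < x}; elements are distinct (first components are the indices)
def pvPairs (k : Int) (xs : List Int) : List (Int × Int) :=
  match xs with
  | [] => []
  | x :: t => (if x > 0 ∧ k < x then [(k, x)] else []) ++ pvPairs (k + 1) t

def compare_bpseq_alt (ref : List Int) (pred : List Int) : Int × Int × Int × Int :=
  let rp := pvPairs 0 ref
  let pp := pvPairs 0 pred
  let tp : Int := (rp.filter (fun q => pp.contains q)).length
  let fp : Int := (pp.filter (fun q => !rp.contains q)).length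
  let fn : Int := (rp.filter (fun q => !pp.contains q)).length
  let n : Int := ref.length
  let tn := PySem.Int.floordiv (n * (n - 1)) 2 - tp - fp - fn
  (tp, tn, fp, fn)

-- ===== PRECONDITION & SPEC =====
-- Pre_: both programs assert len(ref) == len(pred) and raise AssertionError otherwise.
def Pre_compare_bpseq (ref : List Int) (pred : List Int) : Prop := ref.length = pred.length
instance (ref : List Int) (pred : List Int) : Decidable (Pre_compare_bpseq ref pred) := by unfold Pre_compare_bpseq; infer_instance
def pvWitness_compare_bpseq : List Int × List Int := ([3, 0, 1, 0], [3, 4, 1, 0])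

def Spec_compare_bpseq (ref : List Int) (pred : List Int) (out : Int × Int × Int × Int) : Prop := out = compare_bpseq_alt ref pred
instance (ref : List Int) (pred : List Int) (out : Int × Int × Int × Int) : Decidable (Spec_compare_bpseq ref pred out) := by unfold Spec_compare_bpseq; infer_instance

-- ===== CLAIM (what is proved, stated in full; the proofs are below) =====
def Claim_equal_compare_bpseq : Prop := ∀ (ref : List Int) (pred : List Int), Dom_compare_bpseq ref pred → Pre_compare_bpseq ref pred → Spec_compare_bpseq ref pred (compare_bpseq ref pred)

-- ===== LEMMAS AND PROOFS =====

-- Int-valued counters over the zipped list, used to characterise both ports.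
def cntR (i : Int) : List (Int × Int) → Int
  | [] => 0
  | (a, _) :: t => (if a > 0 ∧ i < a then 1 else 0) + cntR (i + 1) t

def cntP (i : Int) : List (Int × Int) → Int
  | [] => 0
  | (_, b) :: t => (if b > 0 ∧ i < b then 1 else 0) + cntP (i + 1) t

def cntM (i : Int) : List (Int × Int) → Int
  | [] => 0
  | (a, b) :: t => (if a > 0 ∧ i < a ∧ a = b then 1 else 0) + cntM (i + 1) t

theorem pvALoop_eq (l : List (Int × Int)) : ∀ (i tp fp fn : Int),
    pvALoop i l tp fp fn =
      (tp + cntM i l, fp + cntP i l - cntM i l, fn + cntR i l - cntM i l) := by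
  induction l with
  | nil => intro i tp fp fn; simp [pvALoop, cntM, cntP, cntR]
  | cons hd t ih =>
    intro i tp fp fn
    obtain ⟨a, b⟩ := hd
    simp only [pvALoop, cntM, cntP, cntR]
    split_ifs with h1 h2 h3 h4 <;> rw [ih] <;>
      (refine Prod.ext ?_ (Prod.ext ?_ ?_)) <;> simp <;> omega

theorem mem_pvPairs {k : Int} {xs : List Int} {q : Int × Int} (h : q ∈ pvPairs k xs) :
    k ≤ q.1 := by
  induction xs generalizing k with
  | nil => simp [pvPairs] at h
  | cons x t ih =>
    simp only [pvPairs, List.mem_append] at h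
    rcases h with h | h
    · split_ifs at h
      · simp only [List.mem_singleton] at h; subst h; simp
      · simp at h
    · have := ih h; omega

theorem contains_pvPairs_cons {k : Int} {b : Int} {t : List Int} {q : Int × Int}
    (hq : k + 1 ≤ q.1) : (pvPairs k (b :: t)).contains q = (pvPairs (k + 1) t).contains q := by
  simp only [pvPairs, List.contains_eq_mem, List.mem_append, decide_eq_decide]
  constructor
  · rintro (h | h)
    · split_ifs at h
      · simp only [List.mem_singleton] at h
        subst h; simp at hq
      · simp at h
    · exact h
  · exact Or.inr

-- intersection size = match count (lengths equal)
theorem filter_contains_eq_cntM : ∀ (ref pred : List Int) (k : Int),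
    ref.length = pred.length →
    (((pvPairs k ref).filter (fun q => (pvPairs k pred).contains q)).length : Int)
      = cntM k (ref.zip pred) := by
  intro ref
  induction ref with
  | nil => intro pred k h; cases pred <;> simp_all [pvPairs, cntM]
  | cons a t ih =>
    intro pred k h
    cases pred with
    | nil => simp at h
    | cons b tp =>
      simp only [List.length_cons, Nat.add_right_cancel_iff] at h
      have htail : ((pvPairs (k+1) t).filter (fun q => (pvPairs k (b :: tp)).contains q))
          = ((pvPairs (k+1) t).filter (fun q => (pvPairs (k+1) tp).contains q)) := by
        apply List.filter_congr
        intro q hq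
        exact contains_pvPairs_cons (mem_pvPairs hq)
      simp only [List.zip_cons_cons, cntM]
      rw [show pvPairs k (a :: t) = (if a > 0 ∧ k < a then [(k, a)] else []) ++ pvPairs (k + 1) t from rfl,
        List.filter_append, List.length_append, htail]
      have hih := ih tp (k+1) h
      by_cases h1 : a > 0 ∧ k < a
      · rw [if_pos h1]
        by_cases h2 : a = b
        · subst h2
          have hc : ((pvPairs k (a :: tp)).contains (k, a)) = true := by
            simp [pvPairs, h1]
          rw [if_pos ⟨h1.1, h1.2, rfl⟩]
          simp only [List.filter_cons, hc, if_true, List.filter_nil, List.length_cons,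
            List.length_nil]
          omega
        · have hc : ((pvPairs k (b :: tp)).contains (k, a)) = false := by
            simp only [pvPairs, List.contains_eq_mem, List.mem_append, decide_eq_false_iff_not]
            rintro (hm | hm)
            · split_ifs at hm
              · simp only [List.mem_singleton, Prod.mk.injEq] at hm
                exact h2 hm.2
              · simp at hm
            · have := mem_pvPairs hm; simp at this
          rw [if_neg (fun hx => h2 hx.2.2)]
          simp only [List.filter_cons, hc, Bool.false_eq_true, if_false, List.filter_nil,
            List.length_nil]
          omega
      · rw [if_neg h1, if_neg (fun hx => h1 ⟨hx.1, hx.2.1⟩)]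
        simp only [List.filter_nil, List.length_nil]
        omega

-- pairs-set size = paired count over the zip (lengths equal), fst side
theorem pvPairs_length_fst : ∀ (ref pred : List Int) (k : Int),
    ref.length = pred.length →
    ((pvPairs k ref).length : Int) = cntR k (ref.zip pred) := by
  intro ref
  induction ref with
  | nil => intro pred k h; cases pred <;> simp_all [pvPairs, cntR]
  | cons a t ih =>
    intro pred k h
    cases pred with
    | nil => simp at h
    | cons b tp =>
      simp only [List.length_cons, Nat.add_right_cancel_iff] at h
      simp only [pvPairs, List.zip_cons_cons, cntR, List.length_append]
      rw [← ih tp (k+1) h]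
      split_ifs <;> simp

theorem cntM_swap : ∀ (l : List (Int × Int)) (k : Int),
    cntM k (l.map Prod.swap) = cntM k l := by
  intro l
  induction l with
  | nil => intro k; simp [cntM]
  | cons hd t ih =>
    intro k
    obtain ⟨a, b⟩ := hd
    simp only [List.map_cons, Prod.swap, cntM, ih]
    congr 1
    by_cases h : a = b
    · simp [h]
    · simp only [h]
      have : ¬ b = a := fun hb => h hb.symm
      simp [this]

theorem zip_swap_eq (ref pred : List Int) :
    (pred.zip ref) = (ref.zip pred).map Prod.swap := by
  rw [← List.zip_swap]

theorem cntR_swap_eq_cntP : ∀ (ref pred : List Int) (k : Int),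
    ref.length = pred.length → cntR k (pred.zip ref) = cntP k (ref.zip pred) := by
  intro ref
  induction ref with
  | nil => intro pred k h; cases pred <;> simp_all [cntR, cntP]
  | cons a t ih =>
    intro pred k h
    cases pred with
    | nil => simp at h
    | cons b tp =>
      simp only [List.length_cons, Nat.add_right_cancel_iff] at h
      simp [List.zip_cons_cons, cntR, cntP, ih tp (k+1) h]


theorem length_filter_not {α : Type} (l : List α) (p : α → Bool) :
    ((l.filter (fun x => !p x)).length : Int) = (l.length : Int) - ((l.filter p).length : Int) := by
  induction l with
  | nil => simp
  | cons x t ih =>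
    by_cases h : p x <;> simp [List.filter, h, ih] <;> omega


-- ===== VERDICT (by name: the statement is the Claim_ definition above) =====
theorem compare_bpseq_spec : Claim_equal_compare_bpseq := by
  intro ref pred _ hpre
  unfold Spec_compare_bpseq compare_bpseq compare_bpseq_alt
  rw [pvALoop_eq]
  have hlen : ref.length = pred.length := hpre
  have hM := filter_contains_eq_cntM ref pred 0 hlen
  have hM' := filter_contains_eq_cntM pred ref 0 hlen.symm
  have hMswap : cntM 0 (pred.zip ref) = cntM 0 (ref.zip pred) := by
    rw [zip_swap_eq, cntM_swap]
  have hR := pvPairs_length_fst ref pred 0 hlen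
  have hP := pvPairs_length_fst pred ref 0 hlen.symm
  have hPswap : cntR 0 (pred.zip ref) = cntP 0 (ref.zip pred) := cntR_swap_eq_cntP ref pred 0 hlen
  have hfp := length_filter_not (pvPairs 0 pred) (fun q => (pvPairs 0 ref).contains q)
  have hfn := length_filter_not (pvPairs 0 ref) (fun q => (pvPairs 0 pred).contains q)
  simp only at *
  refine Prod.ext ?_ (Prod.ext ?_ (Prod.ext ?_ ?_)) <;> simp only <;> omega
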